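-- pv_equiv track=rewrite | github.com/junjange/uttug-seuja-algorithm | 이건희/level2/숫자 카드 나누기.py | calculate
-- ===== SOURCE A (Python) =====
-- def calculate(numList, array):
--     result = [0]
--     if len(numList) == 1:
--         return [0]
--     for i in numList[1:]:
--         for j in array:
--             if j % i == 0:
--                 break
--         else:
--             result.append(i)
--
--     return result
-- ===== SOURCE B (Python) =====
-- def calculate(numList, array):
--     # Build the set of ALL positive divisors of the array elements by trial
--     # division up to sqrt(|j|); i disqualifies iff some j is 0 (0 % i == 0 for
--     # every i != 0) or |i| is in that divisor set.  No per-candidate scan of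
--     # array is needed.
--     divs = set()
--     has_zero = False
--     for j in array:
--         x = abs(j)
--         if x == 0:
--             has_zero = True
--         else:
--             d = 1
--             while d * d <= x:
--                 if x % d == 0:
--                     divs.add(d)
--                     divs.add(x // d)
--                 d += 1
--     result = [0]
--     for i in numList[1:]:
--         if not has_zero and abs(i) not in divs:
--             result.append(i)
--     return result
-- ===== Notes on version B (the rewrite author's own statement) =====
-- stated objective: faster
-- what changed: B replaces A's per-candidate scan of array (O(n*m) modulo tests) by a number-theoretic algorithm: one trial-division pass enumerates all positive divisors of |j| up to sqrt(|j|) for each array element into a set (plus a has-zero flag), then a single pass keeps the candidates whose absolute value is not in that divisor set.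
import Mathlib
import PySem

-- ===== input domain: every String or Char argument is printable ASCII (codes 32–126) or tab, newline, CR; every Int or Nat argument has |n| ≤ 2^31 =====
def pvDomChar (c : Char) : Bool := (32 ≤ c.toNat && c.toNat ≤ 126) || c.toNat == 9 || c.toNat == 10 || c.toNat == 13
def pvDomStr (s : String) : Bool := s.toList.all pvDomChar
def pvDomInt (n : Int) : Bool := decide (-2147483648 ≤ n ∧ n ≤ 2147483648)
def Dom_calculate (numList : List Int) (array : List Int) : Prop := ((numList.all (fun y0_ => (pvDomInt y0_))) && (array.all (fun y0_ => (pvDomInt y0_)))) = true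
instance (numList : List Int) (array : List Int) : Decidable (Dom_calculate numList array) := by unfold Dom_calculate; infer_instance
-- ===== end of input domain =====

-- B replaces A's per-candidate scans of `array` by one trial-division pass that
-- enumerates all positive divisors of the array elements (up to sqrt each),
-- then filters the candidates against that divisor set.

-- ===== PORT A =====
-- for i in numList[1:]: inner for-else over array with break; append i if no j % i == 0
def calculate (numList : List Int) (array : List Int) : List Int :=
  let result : List Int := [0]
  if numList.length == 1 then [0]
  else
    (numList.drop 1).foldl
      (fun result i =>
        if array.any (fun j => PySem.Int.mod j i == 0) then result else result ++ [i])
      result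

-- ===== PORT B =====
-- the `while d * d <= x` trial-division loop of Source B; fuel (x+1-d).toNat makes the
-- same computation total (the loop body is exactly Source B's)
def trialLoopFuel : Nat → Int → Int → PySem.Set Int → PySem.Set Int
  | 0, _, _, s => s
  | n + 1, x, d, s =>
    if d * d ≤ x then
      trialLoopFuel n x (d + 1)
        (if PySem.Int.mod x d == 0 then
            PySem.Set.add (PySem.Set.add s d) (PySem.Int.floordiv x d)
         else s)
    else s

def trialLoop (x : Int) (d : Int) (s : PySem.Set Int) : PySem.Set Int :=
  trialLoopFuel (x + 1 - d).toNat x d s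

-- one iteration of Source B's `for j in array:` loop over the state (divs, has_zero)
def buildStep (st : PySem.Set Int × Bool) (j : Int) : PySem.Set Int × Bool :=
  let x := |j|
  if x == 0 then (st.1, true) else (trialLoop x 1 st.1, st.2)

def calculate_alt (numList : List Int) (array : List Int) : List Int :=
  let st := array.foldl buildStep (PySem.Set.empty, false)
  (numList.drop 1).foldl
    (fun result i =>
      if !st.2 && !(PySem.Set.contains st.1 |i|) then result ++ [i] else result)
    [0]

-- ===== PRECONDITION & SPEC =====
-- Pre_ excludes exactly the inputs where A raises ZeroDivisionError: a 0 among
-- numList[1:] together with a non-empty array (the inner `j % i` with i == 0).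
def Pre_calculate (numList : List Int) (array : List Int) : Prop :=
  (0 : Int) ∉ numList.drop 1 ∨ array = []
instance (numList : List Int) (array : List Int) : Decidable (Pre_calculate numList array) := by unfold Pre_calculate; infer_instance
def pvWitness_calculate : List Int × List Int := ([1, 3, 5], [7, 9])
def Spec_calculate (numList : List Int) (array : List Int) (out : List Int) : Prop := out = calculate_alt numList array
instance (numList : List Int) (array : List Int) (out : List Int) : Decidable (Spec_calculate numList array out) := by unfold Spec_calculate; infer_instance

-- ===== CLAIM (what is proved, stated in full; the proofs are below) =====
def Claim_equal_calculate : Prop := ∀ (numList : List Int) (array : List Int), Dom_calculate numList array → Pre_calculate numList array → Spec_calculate numList array (calculate numList array)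

-- ===== LEMMAS AND PROOFS =====

theorem mem_trialLoopFuel (n : Nat) : ∀ (x d : Int) (s : PySem.Set Int) (a : Int),
    (x + 1 - d).toNat ≤ n → 1 ≤ d →
    (a ∈ trialLoopFuel n x d s ↔
      a ∈ s ∨ ∃ e, d ≤ e ∧ e * e ≤ x ∧ e ∣ x ∧ (a = e ∨ a = PySem.Int.floordiv x e)) := by
  induction n with
  | zero =>
    intro x d s a hn hd
    simp only [trialLoopFuel]
    constructor
    · exact Or.inl
    · rintro (hs | ⟨e, hde, hex, _, _⟩)
      · exact hs
      · exfalso; nlinarith [Int.toNat_of_nonneg (show (0:Int) ≤ x + 1 - d from by nlinarith), hn]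
  | succ n ih =>
    intro x d s a hn hd
    simp only [trialLoopFuel]
    by_cases hc : d * d ≤ x
    · rw [if_pos hc]
      have hdx : d ≤ x := by nlinarith
      rw [ih x (d + 1) _ a (by omega) (by omega)]
      by_cases hm : PySem.Int.mod x d = 0
      · have hdvd : d ∣ x := (PySem.Int.mod_eq_zero_iff_dvd x d).mp hm
        rw [if_pos (by simp [hm])]
        simp only [PySem.Set.mem_add]
        constructor
        · rintro (((hs | rfl) | rfl) | ⟨e, hde, hex, hed, hae⟩)
          · exact Or.inl hs
          · exact Or.inr ⟨a, le_refl a, hc, hdvd, Or.inl rfl⟩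
          · exact Or.inr ⟨d, le_refl d, hc, hdvd, Or.inr rfl⟩
          · exact Or.inr ⟨e, by omega, hex, hed, hae⟩
        · rintro (hs | ⟨e, hde, hex, hed, hae⟩)
          · exact Or.inl (Or.inl (Or.inl hs))
          · rcases eq_or_lt_of_le hde with heq | hlt
            · subst heq
              rcases hae with rfl | rfl
              · exact Or.inl (Or.inl (Or.inr rfl))
              · exact Or.inl (Or.inr rfl)
            · exact Or.inr ⟨e, by omega, hex, hed, hae⟩
      · rw [if_neg (by simp [hm])]
        constructor
        · rintro (hs | ⟨e, hde, hex, hed, hae⟩)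
          · exact Or.inl hs
          · exact Or.inr ⟨e, by omega, hex, hed, hae⟩
        · rintro (hs | ⟨e, hde, hex, hed, hae⟩)
          · exact Or.inl hs
          · rcases eq_or_lt_of_le hde with heq | hlt
            · exact absurd (heq ▸ (PySem.Int.mod_eq_zero_iff_dvd x e).mpr hed) hm
            · exact Or.inr ⟨e, by omega, hex, hed, hae⟩
    · rw [if_neg hc]
      constructor
      · exact Or.inl
      · rintro (hs | ⟨e, hde, hex, _, _⟩)
        · exact hs
        · exfalso; nlinarith

theorem divisor_pair (x a : Int) (hx : 1 ≤ x) :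
    (∃ e, 1 ≤ e ∧ e * e ≤ x ∧ e ∣ x ∧ (a = e ∨ a = PySem.Int.floordiv x e)) ↔
      (1 ≤ a ∧ a ∣ x) := by
  constructor
  · rintro ⟨e, he1, hex, hed, rfl | rfl⟩
    · exact ⟨he1, hed⟩
    · rw [PySem.Int.floordiv_eq_ediv_of_pos (by omega)]
      have hex' : e ≤ x := by nlinarith
      refine ⟨?_, ⟨e, (Int.ediv_mul_cancel hed).symm⟩⟩
      rw [Int.le_ediv_iff_mul_le (by omega)]
      omega
  · rintro ⟨ha1, c, hc⟩
    have hc1 : 1 ≤ c := by nlinarith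
    by_cases hq : a * a ≤ x
    · exact ⟨a, ha1, hq, ⟨c, hc⟩, Or.inl rfl⟩
    · refine ⟨c, hc1, by nlinarith, ⟨a, by rw [hc, mul_comm]⟩, Or.inr ?_⟩
      rw [PySem.Int.floordiv_eq_ediv_of_pos (by omega), hc,
        Int.mul_ediv_cancel _ (by omega)]

theorem mem_trialLoop_one (x : Int) (s : PySem.Set Int) (a : Int) (hx : 1 ≤ x) :
    a ∈ trialLoop x 1 s ↔ a ∈ s ∨ (1 ≤ a ∧ a ∣ x) := by
  unfold trialLoop
  rw [mem_trialLoopFuel _ x 1 s a le_rfl le_rfl, divisor_pair x a hx]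

theorem mem_buildStep (st : PySem.Set Int × Bool) (j a : Int) :
    a ∈ (buildStep st j).1 ↔ a ∈ st.1 ∨ (j ≠ 0 ∧ 1 ≤ a ∧ a ∣ |j|) := by
  unfold buildStep
  by_cases hj : j = 0
  · subst hj; simp
  · have : (|j| == 0) = false := by simp [abs_eq_zero, hj]
    simp only [this, Bool.false_eq_true, if_false]
    rw [mem_trialLoop_one _ _ _ (by have := abs_pos.mpr hj; omega)]
    simp [hj]

theorem snd_buildStep (st : PySem.Set Int × Bool) (j : Int) :
    (buildStep st j).2 = (st.2 || (j == 0)) := by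
  unfold buildStep
  by_cases hj : j = 0
  · subst hj; simp
  · have : (|j| == 0) = false := by simp [abs_eq_zero, hj]
    simp [this, hj]

theorem mem_build_fold (array : List Int) (st : PySem.Set Int × Bool) (a : Int) :
    a ∈ (array.foldl buildStep st).1 ↔
      a ∈ st.1 ∨ ∃ j ∈ array, j ≠ 0 ∧ 1 ≤ a ∧ a ∣ |j| := by
  induction array generalizing st with
  | nil => simp
  | cons b bs ih =>
    simp only [List.foldl_cons]
    rw [ih, mem_buildStep]
    constructor
    · rintro ((hs | hb) | ⟨j, hj, hx⟩)
      · exact Or.inl hs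
      · exact Or.inr ⟨b, List.mem_cons_self, hb⟩
      · exact Or.inr ⟨j, List.mem_cons_of_mem b hj, hx⟩
    · rintro (hs | ⟨j, hj, hx⟩)
      · exact Or.inl (Or.inl hs)
      · rcases List.mem_cons.mp hj with rfl | hj
        · exact Or.inl (Or.inr hx)
        · exact Or.inr ⟨j, hj, hx⟩

theorem snd_build_fold (array : List Int) (st : PySem.Set Int × Bool) :
    (array.foldl buildStep st).2 = (st.2 || array.any (· == 0)) := by
  induction array generalizing st with
  | nil => simp
  | cons b bs ih => simp [List.foldl_cons, ih, snd_buildStep, Bool.or_assoc]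

theorem foldl_append_if (p : Int → Bool) (l acc : List Int) :
    l.foldl (fun r i => if p i then r ++ [i] else r) acc = acc ++ l.filter p := by
  induction l generalizing acc with
  | nil => simp
  | cons x xs ih =>
    simp only [List.foldl_cons, List.filter_cons]
    cases h : p x with
    | true => simp [ih (acc ++ [x])]
    | false => simp [ih]

theorem foldl_append_ifnot (p : Int → Bool) (l acc : List Int) :
    l.foldl (fun r i => if p i then r else r ++ [i]) acc = acc ++ l.filter (fun i => !p i) := by
  induction l generalizing acc with
  | nil => simp
  | cons x xs ih =>
    simp only [List.foldl_cons, List.filter_cons]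
    cases h : p x with
    | true => simp [ih]
    | false => simp [ih (acc ++ [x])]

-- ===== VERDICT (by name: the statement is the Claim_ definition above) =====
theorem calculate_spec : Claim_equal_calculate := by
  intro numList array _ hpre
  unfold Spec_calculate calculate calculate_alt
  by_cases h1 : numList.length == 1
  · have hnil : numList.drop 1 = [] := by
      simp only [beq_iff_eq] at h1
      apply List.eq_nil_of_length_eq_zero
      simp [h1]
    rw [if_pos h1, hnil]
    simp
  · rw [if_neg h1, foldl_append_ifnot, foldl_append_if]
    congr 1
    apply List.filter_congr
    intro i hi
    have hi0 : array ≠ [] → i ≠ 0 := by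
      intro hne
      rcases hpre with hp | hp
      · intro h0; exact hp (h0 ▸ hi)
      · exact absurd hp hne
    have hst2 : (array.foldl buildStep (PySem.Set.empty, false)).2 = array.any (· == 0) := by
      rw [snd_build_fold]; simp
    have hkey : array.any (fun j => PySem.Int.mod j i == 0)
        = ((array.any (· == 0)) ||
           PySem.Set.contains (array.foldl buildStep (PySem.Set.empty, false)).1 |i|) := by
      rw [Bool.eq_iff_iff, Bool.or_eq_true, List.any_eq_true, List.any_eq_true,
        PySem.Set.contains_iff, mem_build_fold]
      simp only [PySem.Set.empty, List.not_mem_nil, false_or, beq_iff_eq]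
      constructor
      · rintro ⟨j, hj, hjm⟩
        have hdvd : i ∣ j := (PySem.Int.mod_eq_zero_iff_dvd j i).mp hjm
        by_cases hj0 : j = 0
        · exact Or.inl ⟨j, hj, hj0⟩
        · refine Or.inr ⟨j, hj, hj0, ?_, ?_⟩
          · have : i ≠ 0 := hi0 (List.ne_nil_of_mem hj)
            have := abs_pos.mpr this
            omega
          · simpa [abs_dvd, dvd_abs] using hdvd
      · rintro (⟨j, hj, hj0⟩ | ⟨j, hj, _, _, hdvd⟩)
        · exact ⟨j, hj, (PySem.Int.mod_eq_zero_iff_dvd j i).mpr (hj0 ▸ dvd_zero i)⟩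
        · refine ⟨j, hj, (PySem.Int.mod_eq_zero_iff_dvd j i).mpr ?_⟩
          simpa [abs_dvd, dvd_abs] using hdvd
    rw [hkey, hst2, Bool.not_or]
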